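-- pv_equiv track=rewrite | github.com/ander0code/rag_sql | core/services/clarify_agent.py | _find_display_field
-- ===== SOURCE A (Python) =====
-- from typing import List, Dict, Optional, Tuple
--
-- def _find_display_field(columns: List[str]) -> Optional[str]:
--     """Encuentra el mejor campo para mostrar opciones"""
--     if not columns:
--         return None
--
--     parsed_cols = []
--     for col in columns:
--         parts = col.split(" ")
--         name = parts[0]
--         col_type = parts[1] if len(parts) > 1 else ""
--         parsed_cols.append({"name": name, "type": col_type.upper()})
--
--     # Priorizar campos descriptivos
--     display_patterns = ["nombre", "name", "titulo", "title", "descripcion", "label"]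
--     for pattern in display_patterns:
--         for col in parsed_cols:
--             if pattern in col["name"].lower():
--                 return col["name"]
--
--     # Buscar campos de texto que no sean IDs o sensibles
--     skip_patterns = [
--         "id",
--         "_id",
--         "fk_",
--         "password",
--         "token",
--         "hash",
--         "key",
--         "secret",
--     ]
--     text_types = ["VARCHAR", "TEXT", "CHAR", "CHARACTER"]
--
--     for col in parsed_cols:
--         name_lower = col["name"].lower()
--         is_text = any(t in col["type"] for t in text_types)
--         is_skip = any(p in name_lower for p in skip_patterns)
--
--         if is_text and not is_skip:
--             return col["name"]
--
--     # Fallback: primer campo que no sea ID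
--     for col in parsed_cols:
--         if not col["name"].lower().endswith("id"):
--             return col["name"]
--
--     return parsed_cols[0]["name"] if parsed_cols else None
-- ===== SOURCE B (Python) =====
-- from typing import List, Optional
--
--
-- def _find_display_field(columns: List[str]) -> Optional[str]:
--     """Single pass over the columns, maintaining the best candidate of each tier."""
--     if not columns:
--         return None
--
--     display_patterns = ["nombre", "name", "titulo", "title", "descripcion", "label"]
--     skip_patterns = ["id", "_id", "fk_", "password", "token", "hash", "key", "secret"]
--     text_types = ["VARCHAR", "TEXT", "CHAR", "CHARACTER"]
--
--     best_pat = None    # (pattern index, name): smallest pattern index, earliest column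
--     first_text = None  # first text-typed, non-sensitive column name
--     first_nonid = None # first column name not ending in "id"
--
--     for col in columns:
--         parts = col.split(" ")
--         name = parts[0]
--         col_type = (parts[1] if len(parts) > 1 else "").upper()
--         low = name.lower()
--
--         for i, p in enumerate(display_patterns):
--             if p in low:
--                 if best_pat is None or i < best_pat[0]:
--                     best_pat = (i, name)
--                 break
--
--         if first_text is None \
--                 and any(t in col_type for t in text_types) \
--                 and not any(p in low for p in skip_patterns):
--             first_text = name
--
--         if first_nonid is None and not low.endswith("id"):
--             first_nonid = name
--
--     if best_pat is not None:
--         return best_pat[1]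
--     if first_text is not None:
--         return first_text
--     if first_nonid is not None:
--         return first_nonid
--     return columns[0].split(" ")[0]
-- ===== Notes on version B (the rewrite author's own statement) =====
-- stated objective: faster
-- what changed: A makes four sequential scans over the parsed columns (a pattern-priority double loop, then a text-type scan, a non-id scan, and a fallback); B makes a single pass over the columns, parsing each once and maintaining the best candidate of each tier (minimal display-pattern index for tier 1, first match for the other tiers), then picks at the end.
import Mathlib
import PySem

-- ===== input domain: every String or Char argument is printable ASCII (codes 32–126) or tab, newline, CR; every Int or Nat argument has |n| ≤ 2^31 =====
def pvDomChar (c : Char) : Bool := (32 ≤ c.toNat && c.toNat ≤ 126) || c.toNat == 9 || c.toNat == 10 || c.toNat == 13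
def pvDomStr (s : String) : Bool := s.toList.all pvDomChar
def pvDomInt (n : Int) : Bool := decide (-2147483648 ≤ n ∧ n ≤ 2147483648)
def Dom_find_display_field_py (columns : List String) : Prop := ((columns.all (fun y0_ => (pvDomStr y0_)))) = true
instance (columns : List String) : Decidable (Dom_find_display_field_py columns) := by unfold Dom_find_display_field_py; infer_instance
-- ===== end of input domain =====

-- B replaces A's four sequential scans over the parsed columns by a single pass that parses each
-- column once and maintains the best candidate of each tier (measured constant-factor speedup).

-- ===== PORT A =====
def pvDisplayPatterns : List String := ["nombre", "name", "titulo", "title", "descripcion", "label"]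
def pvSkipPatterns : List String := ["id", "_id", "fk_", "password", "token", "hash", "key", "secret"]
def pvTextTypes : List String := ["VARCHAR", "TEXT", "CHAR", "CHARACTER"]

-- col.split(" "); name = parts[0]; type = (parts[1] if len(parts) > 1 else "").upper()
-- split? is always `some` here since the separator " " is nonempty, and the parts list is
-- always nonempty, so parts[0] / the len(parts) > 1 test are total: headD/getD defaults never fire
def pvParse (col : String) : String × String :=
  let parts := (PySem.Str.split? col " ").getD []
  (parts.headD "", PySem.Str.upper ((parts.drop 1).headD ""))

def pvIsText (t : String) : Bool := pvTextTypes.any (fun tt => PySem.Str.isIn tt t)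
def pvIsSkip (low : String) : Bool := pvSkipPatterns.any (fun p => PySem.Str.isIn p low)

-- is_text and not is_skip, for one parsed column
def pvTPred (c : String × String) : Bool := pvIsText c.2 && !pvIsSkip (PySem.Str.lower c.1)
-- not name.lower().endswith("id")
def pvNPred (c : String × String) : Bool := !PySem.Str.endswith (PySem.Str.lower c.1) "id"

def find_display_field_py (columns : List String) : Option String :=
  if columns.isEmpty then none
  else
    let parsed := columns.map pvParse
    match pvDisplayPatterns.findSome?
        (fun p => (parsed.find? (fun c => PySem.Str.isIn p (PySem.Str.lower c.1))).map (·.1)) with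
    | some n => some n
    | none =>
      match parsed.find? pvTPred with
      | some c => some c.1
      | none =>
        match parsed.find? pvNPred with
        | some c => some c.1
        | none => parsed.head?.map (·.1)

-- ===== PORT B =====
-- one fold step over a parsed column (best_pat, first_text, first_nonid)
def pvStepP (st : Option (Nat × String) × Option String × Option String)
    (c : String × String) :
    Option (Nat × String) × Option String × Option String :=
  let low := PySem.Str.lower c.1
  let bp :=
    match pvDisplayPatterns.findIdx? (fun p => PySem.Str.isIn p low) with
    | none => st.1
    | some i =>
      match st.1 with
      | none => some (i, c.1)
      | some (j, m) => if i < j then some (i, c.1) else some (j, m)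
  let ft := if st.2.1.isNone && pvTPred c then some c.1 else st.2.1
  let fn := if st.2.2.isNone && pvNPred c then some c.1 else st.2.2
  (bp, ft, fn)

def pvStep (st : Option (Nat × String) × Option String × Option String) (col : String) :
    Option (Nat × String) × Option String × Option String :=
  pvStepP st (pvParse col)

def find_display_field_py_alt (columns : List String) : Option String :=
  match columns with
  | [] => none
  | c0 :: _ =>
    let res := columns.foldl pvStep (none, none, none)
    match res.1 with
    | some (_, n) => some n
    | none =>
      match res.2.1 with
      | some n => some n
      | none =>
        match res.2.2 with
        | some n => some n
        | none => some (pvParse c0).1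

-- ===== PRECONDITION & SPEC =====
def Spec_find_display_field_py (columns : List String) (out : Option String) : Prop := out = find_display_field_py_alt columns
instance (columns : List String) (out : Option String) : Decidable (Spec_find_display_field_py columns out) := by unfold Spec_find_display_field_py; infer_instance

-- ===== CLAIM (what is proved, stated in full; the proofs are below) =====
def Claim_equal_find_display_field_py : Prop := ∀ (columns : List String), Dom_find_display_field_py columns → Spec_find_display_field_py columns (find_display_field_py columns)

-- ===== LEMMAS AND PROOFS =====

-- the best (pattern-index, name) over a parsed list, generalised over the pattern list P
def pvBest (P : List String) : List (String × String) → Option (Nat × String)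
  | [] => none
  | c :: t =>
    match P.findIdx? (fun p => PySem.Str.isIn p (PySem.Str.lower c.1)), pvBest P t with
    | none, r => r
    | some i, none => some (i, c.1)
    | some i, some (j, m) => if i ≤ j then some (i, c.1) else some (j, m)

-- accumulator-wins-ties merge for the best_pat fold
def pvComb : Option (Nat × String) → Option (Nat × String) → Option (Nat × String)
  | none, r => r
  | some a, none => some a
  | some (j, m), some (i, n) => if i < j then some (i, n) else some (j, m)

def pvBpStep (a : Option (Nat × String)) (c : String × String) : Option (Nat × String) :=
  match pvDisplayPatterns.findIdx? (fun p => PySem.Str.isIn p (PySem.Str.lower c.1)) with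
  | none => a
  | some i =>
    match a with
    | none => some (i, c.1)
    | some (j, m) => if i < j then some (i, c.1) else some (j, m)

def pvFirstStep (p : String × String → Bool) (a : Option String) (c : String × String) : Option String :=
  if a.isNone && p c then some c.1 else a

theorem pvFold_split (l : List (String × String))
    (a : Option (Nat × String)) (b d : Option String) :
    l.foldl pvStepP (a, b, d)
      = (l.foldl pvBpStep a,
         l.foldl (pvFirstStep pvTPred) b,
         l.foldl (pvFirstStep pvNPred) d) := by
  induction l generalizing a b d with
  | nil => rfl
  | cons c t ih => simpa [List.foldl_cons] using ih (pvBpStep a c) (pvFirstStep pvTPred b c) (pvFirstStep pvNPred d c)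

theorem pvFirst_fold (p : String × String → Bool) (l : List (String × String)) (a : Option String) :
    l.foldl (pvFirstStep p) a = match a with
      | some x => some x
      | none => (l.find? p).map (·.1) := by
  induction l generalizing a with
  | nil => cases a <;> rfl
  | cons c t ih =>
    cases a with
    | some x => simp [List.foldl_cons, pvFirstStep, ih]
    | none =>
      by_cases h : p c
      · simp [List.foldl_cons, pvFirstStep, h, ih]
      · simp [List.foldl_cons, pvFirstStep, h, ih]

theorem pvComb_none (r : Option (Nat × String)) : pvComb none r = r := rfl

theorem pvBp_fold (l : List (String × String)) (a : Option (Nat × String)) :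
    l.foldl pvBpStep a = pvComb a (pvBest pvDisplayPatterns l) := by
  induction l generalizing a with
  | nil => cases a <;> rfl
  | cons c t ih =>
    rw [List.foldl_cons, ih]
    rcases h1 : pvDisplayPatterns.findIdx? (fun p => PySem.Str.isIn p (PySem.Str.lower c.1)) with _ | i
    · simp only [pvBpStep, pvBest, h1]
    · rcases h2 : pvBest pvDisplayPatterns t with _ | ⟨j, m⟩ <;>
        rcases a with _ | ⟨k, n⟩ <;>
        simp only [pvBpStep, pvBest, h1, h2] <;>
        (try split_ifs) <;> (try simp only [pvComb]) <;> (try split_ifs) <;>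
        first | rfl | (exfalso; omega)

theorem pvBest_nil_pats (l : List (String × String)) : pvBest [] l = none := by
  induction l with
  | nil => rfl
  | cons c t ih => simp [pvBest, ih]

theorem pvBest_of_find (p : String) (P : List String) (l : List (String × String)) (c0 : String × String)
    (h : l.find? (fun c => PySem.Str.isIn p (PySem.Str.lower c.1)) = some c0) :
    pvBest (p :: P) l = some (0, c0.1) := by
  induction l with
  | nil => simp at h
  | cons c t ih =>
    rw [List.find?_cons] at h
    by_cases hc : PySem.Str.isIn p (PySem.Str.lower c.1) = true
    · simp only [hc] at h
      obtain rfl : c = c0 := by simpa using h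
      have hcC : PySem.Chars.isIn p.toList (PySem.Chars.lower c.1.toList) = true := by
        simpa using hc
      have h1 : (p :: P).findIdx? (fun q => PySem.Str.isIn q (PySem.Str.lower c.1)) = some 0 := by
        simp [List.findIdx?_cons, hcC]
      rcases h2 : pvBest (p :: P) t with _ | ⟨j, m⟩ <;> (simp only [pvBest, h1, h2]; try simp)
    · simp only [Bool.not_eq_true] at hc
      simp only [hc] at h
      have ih' := ih h
      have hcC : PySem.Chars.isIn p.toList (PySem.Chars.lower c.1.toList) = false := by
        simpa using hc
      have h1 : (p :: P).findIdx? (fun q => PySem.Str.isIn q (PySem.Str.lower c.1))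
          = (P.findIdx? (fun q => PySem.Str.isIn q (PySem.Str.lower c.1))).map (· + 1) := by
        simp [List.findIdx?_cons, hcC]
      rcases h3 : P.findIdx? (fun q => PySem.Str.isIn q (PySem.Str.lower c.1)) with _ | i <;>
        (simp only [pvBest, h1, h3, Option.map_none, Option.map_some, ih']; try simp)

theorem pvBest_shift (p : String) (P : List String) (l : List (String × String))
    (h : ∀ c ∈ l, PySem.Str.isIn p (PySem.Str.lower c.1) = false) :
    pvBest (p :: P) l = (pvBest P l).map (fun x => (x.1 + 1, x.2)) := by
  induction l with
  | nil => rfl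
  | cons c t ih =>
    have hc := h c (by simp)
    have ht : ∀ x ∈ t, PySem.Str.isIn p (PySem.Str.lower x.1) = false :=
      fun x hx => h x (List.mem_cons_of_mem _ hx)
    have hcC : PySem.Chars.isIn p.toList (PySem.Chars.lower c.1.toList) = false := by
      simpa using hc
    have h1 : (p :: P).findIdx? (fun q => PySem.Str.isIn q (PySem.Str.lower c.1))
        = (P.findIdx? (fun q => PySem.Str.isIn q (PySem.Str.lower c.1))).map (· + 1) := by
      simp [List.findIdx?_cons, hcC]
    rcases h3 : P.findIdx? (fun q => PySem.Str.isIn q (PySem.Str.lower c.1)) with _ | i <;>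
      rcases h4 : pvBest P t with _ | ⟨j, m⟩ <;>
      (simp only [pvBest, h1, h3, h4, Option.map_none, Option.map_some, ih ht];
        try split_ifs) <;> first | rfl | (exfalso; omega)

theorem pvA1_eq_best (P : List String) (l : List (String × String)) :
    P.findSome? (fun p => (l.find? (fun c => PySem.Str.isIn p (PySem.Str.lower c.1))).map (·.1))
      = (pvBest P l).map (·.2) := by
  induction P with
  | nil => simp [pvBest_nil_pats]
  | cons p Ps ih =>
    rw [List.findSome?_cons]
    rcases hf : l.find? (fun c => PySem.Str.isIn p (PySem.Str.lower c.1)) with _ | c0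
    · have hall : ∀ c ∈ l, PySem.Str.isIn p (PySem.Str.lower c.1) = false := by
        intro c hcmem; simpa using List.find?_eq_none.mp hf c hcmem
      rw [pvBest_shift p Ps l hall]
      simp only [hf, Option.map_none, ih, Option.map_map]
      rcases pvBest Ps l with _ | ⟨j, m⟩ <;> rfl
    · simp only [hf, Option.map_some, pvBest_of_find p Ps l c0 hf]

-- ===== VERDICT (by name: the statement is the Claim_ definition above) =====
theorem pvFoldStep_bridge (columns : List String) :
    columns.foldl pvStep (none, none, none)
      = (columns.map pvParse).foldl pvStepP (none, none, none) := by
  rw [List.foldl_map]; rfl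

theorem find_display_field_py_spec : Claim_equal_find_display_field_py := by
  intro columns _
  unfold Spec_find_display_field_py
  cases columns with
  | nil => rfl
  | cons c0 cs =>
    simp only [find_display_field_py, find_display_field_py_alt, List.isEmpty_cons,
      pvFoldStep_bridge, pvFold_split, pvBp_fold, pvComb_none, pvFirst_fold, pvA1_eq_best,
      if_false, Bool.false_eq_true]
    rcases hb : pvBest pvDisplayPatterns ((c0 :: cs).map pvParse) with _ | ⟨i, n⟩ <;>
      rcases hf1 : ((c0 :: cs).map pvParse).find? pvTPred with _ | d1 <;>
      rcases hf2 : ((c0 :: cs).map pvParse).find? pvNPred with _ | d2 <;>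
      simp
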